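-- pv_equiv track=rewrite | github.com/wang-mingzhi/PythonCode | 薛伟珉/yz&zy.py | minlist
-- ===== SOURCE A (Python) =====
-- def minlist(a):
--     min = 99999
--     for i in range(len(a)):
--         if a[i]==0:
--             continue
--         elif a[i]<=min:
--             min = a[i]
--             index = i
--     return min,index
-- ===== SOURCE B (Python) =====
-- def minlist(a):
--     m = 99999
--     for v in a:
--         if v != 0 and v <= m:
--             m = v
--     for i in range(len(a)):
--         if a[i] == m:
--             index = i
--     return m, index
-- ===== Notes on version B (the rewrite author's own statement) =====
-- stated objective: alternative
-- what changed: A's single combined scan (tracking min and update index together) is split into two independent passes: one loop computing the clamped minimum nonzero value, then a separate loop finding the last index holding that value.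
import Mathlib
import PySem

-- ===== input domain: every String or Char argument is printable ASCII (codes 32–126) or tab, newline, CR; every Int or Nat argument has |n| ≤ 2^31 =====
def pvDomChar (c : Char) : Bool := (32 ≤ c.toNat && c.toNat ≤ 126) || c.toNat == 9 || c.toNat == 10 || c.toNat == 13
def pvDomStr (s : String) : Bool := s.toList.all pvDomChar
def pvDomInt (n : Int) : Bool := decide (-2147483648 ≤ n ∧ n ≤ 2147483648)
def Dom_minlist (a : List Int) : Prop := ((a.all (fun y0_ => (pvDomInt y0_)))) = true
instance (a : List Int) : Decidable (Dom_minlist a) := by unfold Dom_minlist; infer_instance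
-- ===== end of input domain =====

-- B replaces A's single combined scan by two passes (min value first, then last matching
-- index); the proved claim is about the RETURN value on inputs where A returns.

-- ===== PORT A =====
-- A's loop 'for i in range(len(a))' over state (min, index); index starts unbound
-- (Option; none = unbound, NameError at the return is outside Pre_, getD 0 is a dummy there).
def minlistLoopA (l : List Int) (k : Nat) (st : Int × Option Int) : Int × Option Int :=
  match l with
  | [] => st
  | v :: r =>
      minlistLoopA r (k + 1)
        (if v = 0 then st else if v ≤ st.1 then (v, some (k : Int)) else st)

def minlist (a : List Int) : Int × Int :=
  let st := minlistLoopA a 0 (99999, none)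
  (st.1, st.2.getD 0)

-- ===== PORT B =====
-- first loop: 'for v in a: if v != 0 and v <= m: m = v'
def minAltLoop (l : List Int) (m : Int) : Int :=
  match l with
  | [] => m
  | v :: r => minAltLoop r (if v ≠ 0 ∧ v ≤ m then v else m)

-- second loop: 'for i in range(len(a)): if a[i] == m: index = i' (k tracks i)
def idxAltLoop (l : List Int) (k : Nat) (m : Int) (idx : Option Int) : Option Int :=
  match l with
  | [] => idx
  | v :: r => idxAltLoop r (k + 1) m (if v = m then some (k : Int) else idx)

def minlist_alt (a : List Int) : Int × Int :=
  let m := minAltLoop a 99999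
  (m, (idxAltLoop a 0 m none).getD 0)

-- ===== PRECONDITION & SPEC =====
-- Pre_ excludes exactly the inputs on which A raises NameError ('index' never bound):
-- lists with no nonzero element ≤ 99999 (B raises NameError there as well).
def Pre_minlist (a : List Int) : Prop := ∃ v ∈ a, v ≠ 0 ∧ v ≤ 99999
instance (a : List Int) : Decidable (Pre_minlist a) := by unfold Pre_minlist; infer_instance
def pvWitness_minlist : List Int := ([0, 7, 3, 3, 100000])

def Spec_minlist (a : List Int) (out : Int × Int) : Prop := out = minlist_alt a
instance (a : List Int) (out : Int × Int) : Decidable (Spec_minlist a out) := by unfold Spec_minlist; infer_instance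

-- ===== CLAIM (what is proved, stated in full; the proofs are below) =====
def Claim_equal_minlist : Prop := ∀ (a : List Int), Dom_minlist a → Pre_minlist a → Spec_minlist a (minlist a)

-- ===== LEMMAS AND PROOFS =====

-- last index (counting from k) of an element equal to t, defined from the right
def lastIdx (l : List Int) (k : Nat) (t : Int) : Option Int :=
  match l with
  | [] => none
  | v :: r => Option.or (lastIdx r (k + 1) t) (if v = t then some (k : Int) else none)

theorem idxAltLoop_eq_or (l : List Int) (k : Nat) (m : Int) (idx : Option Int) :
    idxAltLoop l k m idx = Option.or (lastIdx l k m) idx := by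
  induction l generalizing k idx with
  | nil => simp [idxAltLoop, lastIdx]
  | cons v r ih =>
      simp only [idxAltLoop, lastIdx, ih, Option.or_assoc]
      by_cases h : v = m <;> simp [h]

theorem minAltLoop_le (l : List Int) (m : Int) : minAltLoop l m ≤ m := by
  induction l generalizing m with
  | nil => simp [minAltLoop]
  | cons v r ih =>
      simp only [minAltLoop]
      split_ifs with h
      · exact le_trans (ih v) h.2
      · exact ih m

theorem minAltLoop_ne_zero (l : List Int) (m : Int) (hm : m ≠ 0) : minAltLoop l m ≠ 0 := by
  induction l generalizing m with
  | nil => simpa [minAltLoop]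
  | cons v r ih =>
      simp only [minAltLoop]
      split_ifs with h
      · exact ih v h.1
      · exact ih m hm

theorem minAltLoop_mem (l : List Int) (m : Int) :
    minAltLoop l m = m ∨ minAltLoop l m ∈ l := by
  induction l generalizing m with
  | nil => simp [minAltLoop]
  | cons v r ih =>
      simp only [minAltLoop]
      split_ifs with h
      · rcases ih v with h1 | h1
        · right; simp [h1]
        · right; simp [h1]
      · rcases ih m with h1 | h1
        · left; exact h1
        · right; simp [h1]

theorem lastIdx_isSome_of_mem (l : List Int) (k : Nat) (t : Int) (ht : t ∈ l) :
    (lastIdx l k t).isSome = true := by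
  induction l generalizing k with
  | nil => simp at ht
  | cons v r ih =>
      simp only [lastIdx]
      rcases List.mem_cons.mp ht with h | h
      · cases ho : lastIdx r (k + 1) t <;> simp [Option.or, ho, h.symm]
      · cases ho : lastIdx r (k + 1) t with
        | none => have := ih (k + 1) h; simp [ho] at this
        | some x => simp [Option.or, ho]

-- first components agree: A's running min evolves exactly as B's first loop
theorem minlistLoopA_fst (l : List Int) (k : Nat) (m : Int) (o : Option Int) :
    (minlistLoopA l k (m, o)).1 = minAltLoop l m := by
  induction l generalizing k m o with
  | nil => simp [minlistLoopA, minAltLoop]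
  | cons v r ih =>
      simp only [minlistLoopA, minAltLoop]
      by_cases h0 : v = 0
      · simp [h0, ih]
      · by_cases hle : v ≤ m
        · simp [h0, hle, ih]
        · simp [h0, hle, ih]

-- A's final index is the last index of the final minimum, falling back to the incoming state
theorem minlistLoopA_snd (l : List Int) (k : Nat) (m : Int) (o : Option Int) (hm : m ≠ 0) :
    (minlistLoopA l k (m, o)).2 = Option.or (lastIdx l k (minAltLoop l m)) o := by
  induction l generalizing k m o with
  | nil => simp [minlistLoopA, minAltLoop, lastIdx]
  | cons v r ih =>
      by_cases h0 : v = 0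
      · -- zero is skipped; it can never equal the (nonzero) final minimum
        have hz : ¬ ((0:Int) = minAltLoop r m) := fun h => minAltLoop_ne_zero r m hm h.symm
        simp [minlistLoopA, minAltLoop, lastIdx, h0, hz, ih (k + 1) m o hm, Option.or_assoc]
      · by_cases hle : v ≤ m
        · -- update: new state (v, some k)
          have hrec := ih (k + 1) v (some (k : Int)) h0
          by_cases hv : v = minAltLoop r v
          · simp [minlistLoopA, minAltLoop, lastIdx, h0, hle, hrec, ← hv, Option.or_assoc,
              Option.or]
            cases lastIdx r (k + 1) v <;> simp [Option.or]
          · -- the minimum improves strictly inside r, hence is found there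
            have hmem : minAltLoop r v ∈ r := by
              rcases minAltLoop_mem r v with h | h
              · exact absurd h.symm hv
              · exact h
            have hs := lastIdx_isSome_of_mem r (k + 1) (minAltLoop r v) hmem
            obtain ⟨x, hx⟩ := Option.isSome_iff_exists.mp hs
            simp [minlistLoopA, minAltLoop, lastIdx, h0, hle, hrec, hx,
              (Ne.symm hv : minAltLoop r v ≠ v), Option.or]
        · -- no update; v > m ≥ final minimum, so v never equals it
          have hne : v ≠ minAltLoop r m :=
            fun h => hle (h ▸ le_trans (minAltLoop_le r m) le_rfl)
          simp [minlistLoopA, minAltLoop, lastIdx, h0, hle, hne, ih (k + 1) m o hm,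
            Option.or_assoc]

-- ===== VERDICT (by name: the statement is the Claim_ definition above) =====
theorem minlist_spec : Claim_equal_minlist := by
  intro a _ _
  unfold Spec_minlist minlist minlist_alt
  have h1 := minlistLoopA_fst a 0 99999 none
  have h2 := minlistLoopA_snd a 0 99999 none (by norm_num)
  simp only [h1, h2, idxAltLoop_eq_or]
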